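-- pv_equiv track=rewrite | github.com/roesel/ukulele-songbook | pre.py | chord_positions
-- ===== SOURCE A (Python) =====
-- def chord_positions(chordline):
--     ''' Returns a list of chords and their respective positions in line. '''
--     chords = chordline.split()
--     start = 0
--     positions = []
--     for c in chords:
--         start = chordline.index(c, start)
--         positions.append(start)
--         start += len(c)
--     return chords, positions
-- ===== SOURCE B (Python) =====
-- def chord_positions(chordline):
--     ''' Returns a list of chords and their respective positions in line. '''
--     chords = []
--     positions = []
--     i = 0
--     n = len(chordline)
--     while i < n:
--         if chordline[i].isspace():
--             i += 1
--         else: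
--             j = i + 1
--             while j < n and not chordline[j].isspace():
--                 j += 1
--             chords.append(chordline[i:j])
--             positions.append(i)
--             i = j
--     return chords, positions
-- ===== Notes on version B (the rewrite author's own statement) =====
-- stated objective: alternative
-- what changed: Replaced split() plus an advancing .index substring search with one left-to-right scan that tokenizes maximal non-whitespace runs and records their start offsets in a single pass.
import Mathlib
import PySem

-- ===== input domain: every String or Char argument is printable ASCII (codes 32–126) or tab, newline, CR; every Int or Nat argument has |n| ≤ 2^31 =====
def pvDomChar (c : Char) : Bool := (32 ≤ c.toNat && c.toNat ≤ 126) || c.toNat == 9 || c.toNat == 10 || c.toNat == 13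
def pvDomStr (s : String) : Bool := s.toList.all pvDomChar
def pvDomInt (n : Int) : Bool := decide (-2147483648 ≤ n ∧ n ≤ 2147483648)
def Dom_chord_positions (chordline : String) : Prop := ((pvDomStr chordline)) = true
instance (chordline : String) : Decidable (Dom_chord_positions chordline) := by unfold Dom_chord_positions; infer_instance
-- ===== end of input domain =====

-- B replaces split() + advancing .index search with a single left-to-right scan recording run starts (alternative decomposition, same cost).


-- ===== PORT A =====
-- Python's chordline.index(c, start) is Str.findFrom chordline c start; .index never raises
-- here because each c is a whitespace-split token of chordline occurring at or after start.
def chordLoop (chordline : String) : List String → Int → List Int → List Int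
  | [], _, positions => positions
  | c :: cs, start, positions =>
      let found := PySem.Str.findFrom chordline c start
      chordLoop chordline cs (found + PySem.Str.len c) (positions ++ [found])

def chord_positions (chordline : String) : List String × List Int :=
  let chords := PySem.Str.split₀ chordline
  (chords, chordLoop chordline chords 0 [])

-- ===== PORT B =====
-- one pass: skip a whitespace char, or record the index of a non-whitespace run and consume it
def chordScan : List Char → Nat → List (List Char) × List Int
  | [], _ => ([], [])
  | c :: rest, i =>
      if PySem.Chars.isspace c then chordScan rest (i + 1)
      else
        let tok := c :: rest.takeWhile (fun d => !PySem.Chars.isspace d)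
        let r := chordScan (rest.dropWhile (fun d => !PySem.Chars.isspace d)) (i + tok.length)
        (tok :: r.1, (i : Int) :: r.2)
termination_by l _ => l.length
decreasing_by
  all_goals simp only [List.length_cons]
  all_goals have h2 := List.length_dropWhile_le (fun d => !PySem.Chars.isspace d) rest
  all_goals omega

def chord_positions_alt (chordline : String) : List String × List Int :=
  let r := chordScan chordline.toList 0
  (r.1.map String.ofList, r.2)

-- ===== PRECONDITION & SPEC =====
def Spec_chord_positions (chordline : String) (out : List String × List Int) : Prop := out = chord_positions_alt chordline
instance (chordline : String) (out : List String × List Int) : Decidable (Spec_chord_positions chordline out) := by unfold Spec_chord_positions; infer_instance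

-- ===== CLAIM (what is proved, stated in full; the proofs are below) =====
def Claim_equal_chord_positions : Prop := ∀ (chordline : String), Dom_chord_positions chordline → Spec_chord_positions chordline (chord_positions chordline)

-- ===== LEMMAS AND PROOFS =====

lemma go_acc : ∀ (l cur : List Char) (acc : List (List Char)),
    PySem.Chars.split₀.go l cur acc = acc.reverse ++ PySem.Chars.split₀.go l cur [] := by
  intro l
  induction l with
  | nil =>
      intro cur acc
      simp only [PySem.Chars.split₀.go]
      split_ifs <;> simp
  | cons c rest ih =>
      intro cur acc
      simp only [PySem.Chars.split₀.go]
      split_ifs with h1 h2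
      · rw [ih [] acc]
      · rw [ih [] (cur.reverse :: acc), ih [] [cur.reverse]]; simp
      · rw [ih (c :: cur) acc]

lemma go_cur : ∀ (rest cur : List Char), cur ≠ [] →
    PySem.Chars.split₀.go rest cur [] =
      (cur.reverse ++ rest.takeWhile (fun d => !PySem.Chars.isspace d)) ::
        PySem.Chars.split₀.go (rest.dropWhile (fun d => !PySem.Chars.isspace d)) [] [] := by
  intro rest
  induction rest with
  | nil =>
      intro cur hcur
      simp [PySem.Chars.split₀.go, List.isEmpty_iff, hcur]
  | cons d rest' ih =>
      intro cur hcur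
      by_cases hd : PySem.Chars.isspace d = true
      · have h1 : PySem.Chars.split₀.go (d :: rest') cur [] =
            PySem.Chars.split₀.go rest' [] [cur.reverse] := by
          simp only [PySem.Chars.split₀.go]
          simp [hd, List.isEmpty_iff, hcur]
        have h2 : PySem.Chars.split₀.go (d :: rest') [] [] =
            PySem.Chars.split₀.go rest' [] [] := by
          simp only [PySem.Chars.split₀.go]
          simp [hd]
        rw [h1, go_acc rest' [] [cur.reverse]]
        simp [List.dropWhile_cons, hd, h2]
      · have hd' : PySem.Chars.isspace d = false := by simpa using hd
        have h1 : PySem.Chars.split₀.go (d :: rest') cur [] =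
            PySem.Chars.split₀.go rest' (d :: cur) [] := by
          simp only [PySem.Chars.split₀.go]
          simp [hd']
        rw [h1, ih (d :: cur) (by simp)]
        simp [List.takeWhile_cons, hd']

lemma split_go_eq_scan : ∀ (n : Nat) (l : List Char), l.length ≤ n → ∀ (i : Nat),
    PySem.Chars.split₀.go l [] [] = (chordScan l i).1 := by
  intro n
  induction n with
  | zero =>
      intro l hl i
      have : l = [] := List.eq_nil_of_length_eq_zero (Nat.le_zero.mp hl)
      subst this
      simp [PySem.Chars.split₀.go, chordScan]
  | succ n ih =>
      intro l hl i
      cases l with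
      | nil => simp [PySem.Chars.split₀.go, chordScan]
      | cons c rest =>
        by_cases hc : PySem.Chars.isspace c = true
        · have h1 : PySem.Chars.split₀.go (c :: rest) [] [] =
              PySem.Chars.split₀.go rest [] [] := by
            simp only [PySem.Chars.split₀.go]; simp [hc]
          rw [h1, ih rest (by simpa using Nat.lt_succ_iff.mp (by simpa using hl)) (i + 1)]
          simp [chordScan, hc]
        · have hc' : PySem.Chars.isspace c = false := by simpa using hc
          have h1 : PySem.Chars.split₀.go (c :: rest) [] [] =
              PySem.Chars.split₀.go rest [c] [] := by
            simp only [PySem.Chars.split₀.go]; simp [hc']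
          rw [h1, go_cur rest [c] (by simp)]
          have hlen : (rest.dropWhile (fun d => !PySem.Chars.isspace d)).length ≤ n := by
            have := List.length_dropWhile_le (fun d => !PySem.Chars.isspace d) rest
            simp at hl; omega
          rw [ih _ hlen (i + (c :: rest.takeWhile (fun d => !PySem.Chars.isspace d)).length)]
          simp [chordScan, hc']

lemma split₀_eq_scan (l : List Char) (i : Nat) :
    PySem.Chars.split₀ l = (chordScan l i).1 := by
  unfold PySem.Chars.split₀
  exact split_go_eq_scan l.length l le_rfl i

lemma findGo_spaces : ∀ (ws : List Char) (k : Nat) (c : Char) (tw rest : List Char),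
    (∀ w ∈ ws, PySem.Chars.isspace w = true) → PySem.Chars.isspace c = false →
    tw <+: rest →
    PySem.Chars.find.go (c :: tw) (ws ++ c :: rest) k = ((k + ws.length : Nat) : Int) := by
  intro ws
  induction ws with
  | nil =>
      intro k c tw rest _ hc htw
      simp only [List.nil_append, PySem.Chars.find.go]
      have : (c :: tw).isPrefixOf (c :: rest) = true := by
        rw [List.isPrefixOf_iff_prefix]
        exact List.cons_prefix_cons.mpr ⟨rfl, htw⟩
      simp [this]
  | cons w ws' ih =>
      intro k c tw rest hws hc htw
      have hw : PySem.Chars.isspace w = true := hws w (by simp)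
      have hne : ¬ (c :: tw).isPrefixOf (w :: (ws' ++ c :: rest)) = true := by
        rw [List.isPrefixOf_iff_prefix, List.cons_prefix_cons]
        rintro ⟨rfl, -⟩
        rw [hw] at hc; exact absurd hc (by simp)
      simp only [List.cons_append, PySem.Chars.find.go]
      rw [if_neg hne, ih (k + 1) c tw rest (fun w hw => hws w (by simp [hw])) hc htw]
      simp; omega

lemma findFrom_run (s l₀ : List Char) (c : Char) (tw rest : List Char) (start : Int)
    (hs : s = l₀ ++ c :: rest) (h0 : 0 ≤ start) (hle : start ≤ (l₀.length : Int))
    (hsp : ∀ w ∈ l₀.drop start.toNat, PySem.Chars.isspace w = true)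
    (hc : PySem.Chars.isspace c = false) (htw : tw <+: rest) :
    PySem.Chars.findFrom s (c :: tw) start none = (l₀.length : Int) := by
  have hk : start = ((start.toNat : Nat) : Int) := (Int.toNat_of_nonneg h0).symm
  have hk2 : start.toNat ≤ l₀.length := by omega
  have hk3 : start.toNat ≤ s.length := by subst hs; simp; omega
  rw [hk, PySem.Chars.findFrom_natCast s _ start.toNat hk3]
  have hdrop : s.drop start.toNat = l₀.drop start.toNat ++ c :: rest := by
    subst hs; exact List.drop_append_of_le_length hk2
  rw [hdrop]
  have hfind : PySem.Chars.find (l₀.drop start.toNat ++ c :: rest) (c :: tw)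
      = (((l₀.drop start.toNat).length : Nat) : Int) := by
    unfold PySem.Chars.find
    simpa using findGo_spaces (l₀.drop start.toNat) 0 c tw rest hsp hc htw
  rw [hfind]
  rw [if_neg (by omega)]
  simp [List.length_drop]
  omega

lemma mainLoop (s : String) : ∀ (n : Nat) (suffix l₀ : List Char) (start : Int) (acc : List Int),
    suffix.length ≤ n →
    s.toList = l₀ ++ suffix → 0 ≤ start → start ≤ (l₀.length : Int) →
    (∀ w ∈ l₀.drop start.toNat, PySem.Chars.isspace w = true) →
    chordLoop s ((chordScan suffix l₀.length).1.map String.ofList) start acc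
      = acc ++ (chordScan suffix l₀.length).2 := by
  intro n
  induction n with
  | zero =>
      intro suffix l₀ start acc hn hs h0 hle hsp
      have : suffix = [] := List.eq_nil_of_length_eq_zero (Nat.le_zero.mp hn)
      subst this
      simp [chordScan, chordLoop]
  | succ n ih =>
      intro suffix l₀ start acc hn hs h0 hle hsp
      cases suffix with
      | nil => simp [chordScan, chordLoop]
      | cons c rest =>
        by_cases hc : PySem.Chars.isspace c = true
        · -- whitespace step: scan moves on, loop state unchanged
          have hscan : chordScan (c :: rest) l₀.length = chordScan rest (l₀.length + 1) := by
            simp [chordScan, hc]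
          rw [hscan]
          have hs' : s.toList = (l₀ ++ [c]) ++ rest := by simpa using hs
          have hsp' : ∀ w ∈ (l₀ ++ [c]).drop start.toNat, PySem.Chars.isspace w = true := by
            intro w hw
            rw [List.drop_append_of_le_length (by omega)] at hw
            rcases List.mem_append.mp hw with h | h
            · exact hsp w h
            · simp at h; subst h; exact hc
          have := ih rest (l₀ ++ [c]) start acc (by simp at hn ⊢; omega) hs' h0
            (by simp; omega) hsp'
          simpa using this
        · -- token step
          have hc' : PySem.Chars.isspace c = false := by simpa using hc
          set tw := rest.takeWhile (fun d => !PySem.Chars.isspace d) with htwdef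
          set rest' := rest.dropWhile (fun d => !PySem.Chars.isspace d) with hrestdef
          have hscan : chordScan (c :: rest) l₀.length =
              ((c :: tw) :: (chordScan rest' (l₀.length + (c :: tw).length)).1,
               (l₀.length : Int) :: (chordScan rest' (l₀.length + (c :: tw).length)).2) := by
            rw [chordScan]; simp [hc', ← htwdef, ← hrestdef]
          rw [hscan]
          have htw : tw <+: rest := List.takeWhile_prefix _
          have hfound : PySem.Str.findFrom s (String.ofList (c :: tw)) start = (l₀.length : Int) := by
            rw [PySem.Str.findFrom_eq, String.toList_ofList]
            exact findFrom_run s.toList l₀ c tw rest start hs h0 hle hsp hc' htw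
          simp only [List.map_cons, chordLoop]
          rw [hfound]
          have hsplit : c :: rest = (c :: tw) ++ rest' := by
            simp [htwdef, hrestdef]
          have hs' : s.toList = (l₀ ++ (c :: tw)) ++ rest' := by
            rw [hs, hsplit]; simp
          have hlen : rest'.length ≤ n := by
            have h := List.length_dropWhile_le (fun d => !PySem.Chars.isspace d) rest
            rw [hrestdef]
            simp at hn; omega
          have hlenstr : PySem.Str.len (String.ofList (c :: tw)) = ((c :: tw).length : Int) := by
            rw [PySem.Str.len_eq, String.toList_ofList]
          have := ih rest' (l₀ ++ (c :: tw)) ((l₀.length : Int) + PySem.Str.len (String.ofList (c :: tw)))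
            (acc ++ [(l₀.length : Int)]) hlen hs'
            (by rw [hlenstr]; omega)
            (by rw [hlenstr]; simp [List.length_append])
            (by intro w hw; rw [hlenstr] at hw; exfalso
                have : ((l₀.length : Int) + ((c :: tw).length : Int)).toNat = (l₀ ++ (c :: tw)).length := by
                  simp; omega
                rw [this, List.drop_length] at hw; simp at hw)
          simp only [List.length_append] at this
          rw [this]
          simp

-- ===== VERDICT (by name: the statement is the Claim_ definition above) =====
theorem chord_positions_spec : Claim_equal_chord_positions := by
  intro s _
  simp only [Spec_chord_positions, chord_positions, chord_positions_alt]
  have h1 : PySem.Str.split₀ s = ((chordScan s.toList 0).1).map String.ofList := by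
    unfold PySem.Str.split₀
    rw [split₀_eq_scan s.toList 0]
  have h2 := mainLoop s s.toList.length s.toList [] 0 [] le_rfl (by simp) le_rfl (by simp) (by simp)
  simp only [List.length_nil] at h2
  rw [h1, h2]
  simp
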